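-- pv_equiv track=rewrite | github.com/clbarnes/h5py_like | h5py_like/shape_utils.py | chunk_into
-- ===== SOURCE A (Python) =====
-- def chunk_into(write_start, write_shape, tgt_chunks, write_stride=None):
--     """
--     You have an array of shape ``write_shape`` which you want to write into a dataset
--     with chunk scheme ``tgt_chunks``, starting at index ``write_start``.
--
--     This will tell you how to chunk your array so that its chunks line up with the
--     dataset chunks.
--
--     Returns a tuple whose items correspond to dimensions;
--     for each dimension, there is a tuple whose items are the lengths of each chunk
--     in that dimension.
--
--     :param write_start:
--     :param write_shape:
--     :param tgt_chunks:
--     :return: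
--     """
--     out = list()
--     if write_stride is None:
--         write_stride = [1] * len(write_start)
--
--     for start_d, shape_d, stride_d, chunk_d in zip(
--         write_start, write_shape, write_stride, tgt_chunks
--     ):
--         chunks_d = []
--         remainder = start_d % chunk_d
--         done = chunk_d - remainder
--         if done:
--             chunks_d.append(done)
--         while done + chunk_d < shape_d:
--             chunks_d.append(chunk_d)
--             done += chunk_d
--         if done != shape_d:
--             chunks_d.append(shape_d - done)
--         out.append(tuple(chunks_d))
--
--     return tuple(out)
-- ===== SOURCE B (Python) =====
-- def chunk_into(write_start, write_shape, tgt_chunks, write_stride=None):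
--     if write_stride is None:
--         write_stride = [1] * len(write_start)
--     out = []
--     for start_d, shape_d, stride_d, chunk_d in zip(
--         write_start, write_shape, write_stride, tgt_chunks
--     ):
--         first = chunk_d - start_d % chunk_d
--         cuts = [first] + list(range(first + chunk_d, shape_d, chunk_d))
--         boundaries = [0] + cuts + ([shape_d] if cuts[-1] != shape_d else [])
--         out.append(tuple(b - a for a, b in zip(boundaries, boundaries[1:])))
--     return tuple(out)
-- ===== Notes on version B (the rewrite author's own statement) =====
-- stated objective: alternative
-- what changed: Per dimension, B computes the chunk-aligned cut positions with range() and emits differences of consecutive boundaries, instead of A's while loop that accumulates a running 'done' length and appends chunk lengths one by one.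
-- outside the precondition, e.g. on chunk_into([0], [-5], [-2], None): A returns ((-2, -3),), B returns ((-2, -2, -1),)
import Mathlib
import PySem

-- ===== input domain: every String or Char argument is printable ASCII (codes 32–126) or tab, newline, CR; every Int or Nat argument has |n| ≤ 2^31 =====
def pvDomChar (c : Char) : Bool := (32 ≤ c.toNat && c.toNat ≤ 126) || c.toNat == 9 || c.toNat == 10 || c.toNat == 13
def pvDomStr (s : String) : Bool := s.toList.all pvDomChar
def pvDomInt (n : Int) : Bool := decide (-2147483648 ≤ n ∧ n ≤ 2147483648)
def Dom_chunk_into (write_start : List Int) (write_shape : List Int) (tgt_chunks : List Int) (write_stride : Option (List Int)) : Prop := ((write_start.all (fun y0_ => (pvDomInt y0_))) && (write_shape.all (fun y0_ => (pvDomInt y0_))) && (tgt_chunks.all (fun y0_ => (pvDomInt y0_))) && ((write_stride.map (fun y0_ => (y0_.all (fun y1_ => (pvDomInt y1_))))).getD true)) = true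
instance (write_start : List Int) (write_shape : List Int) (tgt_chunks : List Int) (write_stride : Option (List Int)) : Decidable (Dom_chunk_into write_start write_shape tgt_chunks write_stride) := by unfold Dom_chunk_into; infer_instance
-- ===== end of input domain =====

-- B replaces A's while-loop length accumulation by chunk-boundary positions (via range) and
-- consecutive differences: an alternative decomposition of the same cost, not claimed faster.

-- ===== PORT A =====
-- Python's `zip(write_start, write_shape, write_stride, tgt_chunks)` (truncates to shortest).
def pvZip4 : List Int → List Int → List Int → List Int → List (Int × Int × Int × Int)
  | a :: as, b :: bs, c :: cs, d :: ds => (a, b, c, d) :: pvZip4 as bs cs ds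
  | _, _, _, _ => []

-- A's `while done + chunk_d < shape_d` loop; fuel only makes it total (exact whenever the
-- Python loop terminates, in particular for chunk_d > 0, since iterations < shape_d - done).
def pvLoopA (fuel : Nat) (shape_d chunk_d : Int) (done : Int) (acc : List Int) : Int × List Int :=
  match fuel with
  | 0 => (done, acc)
  | Nat.succ f =>
      if done + chunk_d < shape_d then
        pvLoopA f shape_d chunk_d (done + chunk_d) (acc ++ [chunk_d])
      else (done, acc)

-- A's loop body for one dimension.
def pvChunkDimA (start_d shape_d _stride_d chunk_d : Int) : List Int :=
  let remainder := PySem.Int.mod start_d chunk_d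
  let done := chunk_d - remainder
  let chunks0 := if done ≠ 0 then [done] else []
  let r := pvLoopA (shape_d - done).toNat shape_d chunk_d done chunks0
  if r.1 ≠ shape_d then r.2 ++ [shape_d - r.1] else r.2

def chunk_into (write_start : List Int) (write_shape : List Int) (tgt_chunks : List Int) (write_stride : Option (List Int)) : List (List Int) :=
  let stride := match write_stride with
    | none => List.replicate write_start.length 1
    | some s => s
  (pvZip4 write_start write_shape stride tgt_chunks).map
    (fun t => pvChunkDimA t.1 t.2.1 t.2.2.1 t.2.2.2)

-- ===== PORT B =====
-- `tuple(b - a for a, b in zip(boundaries, boundaries[1:]))`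
def pvDiffs (l : List Int) : List Int := (l.zip l.tail).map (fun p => p.2 - p.1)

-- B's loop body for one dimension (cuts[-1] on the nonempty list `cuts` is getLast!).
def pvChunkDimB (start_d shape_d _stride_d chunk_d : Int) : List Int :=
  let first := chunk_d - PySem.Int.mod start_d chunk_d
  let cuts := first :: PySem.List.pyRange (first + chunk_d) shape_d chunk_d
  let boundaries := 0 :: cuts ++ (if cuts.getLast! ≠ shape_d then [shape_d] else [])
  pvDiffs boundaries

def chunk_into_alt (write_start : List Int) (write_shape : List Int) (tgt_chunks : List Int) (write_stride : Option (List Int)) : List (List Int) :=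
  let stride := match write_stride with
    | none => List.replicate write_start.length 1
    | some s => s
  (pvZip4 write_start write_shape stride tgt_chunks).map
    (fun t => pvChunkDimB t.1 t.2.1 t.2.2.1 t.2.2.2)

-- ===== PRECONDITION & SPEC =====
-- Pre_ excludes dimensions whose target chunk size is nonpositive: chunk_d == 0 raises
-- ZeroDivisionError in both programs, and for negative chunk_d A's while loop diverges on most
-- shapes or, where it terminates, yields accidental values that differ from B's range-based cuts.
def Pre_chunk_into (write_start : List Int) (write_shape : List Int) (tgt_chunks : List Int) (write_stride : Option (List Int)) : Prop :=
  ∀ c ∈ tgt_chunks.take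
      (min (min write_start.length write_shape.length)
           ((write_stride.getD (List.replicate write_start.length 1)).length)),
    (0 : Int) < c
instance (write_start : List Int) (write_shape : List Int) (tgt_chunks : List Int) (write_stride : Option (List Int)) : Decidable (Pre_chunk_into write_start write_shape tgt_chunks write_stride) := by unfold Pre_chunk_into; infer_instance

def pvWitness_chunk_into : List Int × List Int × List Int × Option (List Int) := ([1], [5], [2], none)

def Spec_chunk_into (write_start : List Int) (write_shape : List Int) (tgt_chunks : List Int) (write_stride : Option (List Int)) (out : List (List Int)) : Prop := out = chunk_into_alt write_start write_shape tgt_chunks write_stride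
instance (write_start : List Int) (write_shape : List Int) (tgt_chunks : List Int) (write_stride : Option (List Int)) (out : List (List Int)) : Decidable (Spec_chunk_into write_start write_shape tgt_chunks write_stride out) := by unfold Spec_chunk_into; infer_instance

-- ===== CLAIM (what is proved, stated in full; the proofs are below) =====
def Claim_equal_chunk_into : Prop := ∀ (write_start : List Int) (write_shape : List Int) (tgt_chunks : List Int) (write_stride : Option (List Int)), Dom_chunk_into write_start write_shape tgt_chunks write_stride → Pre_chunk_into write_start write_shape tgt_chunks write_stride → Spec_chunk_into write_start write_shape tgt_chunks write_stride (chunk_into write_start write_shape tgt_chunks write_stride)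

-- ===== LEMMAS AND PROOFS =====

theorem pvWitness_ok : Dom_chunk_into pvWitness_chunk_into.1 pvWitness_chunk_into.2.1 pvWitness_chunk_into.2.2.1 pvWitness_chunk_into.2.2.2 ∧ Pre_chunk_into pvWitness_chunk_into.1 pvWitness_chunk_into.2.1 pvWitness_chunk_into.2.2.1 pvWitness_chunk_into.2.2.2 := by
  constructor <;> decide

-- pyRange with a positive step: the two structural equations used below.
theorem pyRange_pos_nil (a b s : Int) (hs : 0 < s) (h : b ≤ a) :
    PySem.List.pyRange a b s = [] := by
  rw [PySem.List.pyRange_of_pos a b hs]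
  simp [show ¬ a < b by omega]

theorem pyRange_pos_cons (a b s : Int) (hs : 0 < s) (h : a < b) :
    PySem.List.pyRange a b s = a :: PySem.List.pyRange (a + s) b s := by
  rw [PySem.List.pyRange_of_pos a b hs, PySem.List.pyRange_of_pos (a + s) b hs, if_pos h]
  have hcount : ((b - a + s - 1) / s).toNat
      = (if a + s < b then ((b - (a + s) + s - 1) / s).toNat else 0) + 1 := by
    by_cases h2 : a + s < b
    · rw [if_pos h2]
      have he : b - a + s - 1 = (b - (a + s) + s - 1) + 1 * s := by ring
      have hadd := Int.add_mul_ediv_right (b - (a + s) + s - 1) 1 (by omega : s ≠ 0)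
      have hd : (b - a + s - 1) / s = (b - (a + s) + s - 1) / s + 1 := by rw [he, hadd]
      have hnn : 0 ≤ (b - (a + s) + s - 1) / s := Int.ediv_nonneg (by omega) (by omega)
      omega
    · rw [if_neg h2]
      have hub : (b - a + s - 1) / s < 2 := by
        rw [Int.ediv_lt_iff_lt_mul hs]; omega
      have hlb : 1 ≤ (b - a + s - 1) / s := by
        rw [Int.le_ediv_iff_mul_le hs]; omega
      omega
  rw [hcount, List.range_succ_eq_map, List.map_cons, List.map_map]
  refine congrArg₂ _ (by simp) ?_
  apply List.map_congr_left
  intro k _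
  simp only [Function.comp]
  push_cast
  ring

-- characterisation of A's while loop for positive chunk and sufficient fuel
theorem pv_getLast_getD_cons (l : List Int) : ∀ (a d : Int),
    (a :: l).getLast?.getD d = l.getLast?.getD a := by
  induction l with
  | nil => intro a d; rfl
  | cons x xs ih =>
      intro a d
      rw [List.getLast?_cons_cons, ih x d, ih x a]

theorem pvLoopA_char (sh c : Int) (hc : 0 < c) :
    ∀ (fuel : Nat) (done : Int) (acc : List Int), (sh - done).toNat ≤ fuel →
      pvLoopA fuel sh c done acc =
        ((PySem.List.pyRange (done + c) sh c).getLast?.getD done,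
         acc ++ (PySem.List.pyRange (done + c) sh c).map (fun _ => c)) := by
  intro fuel
  induction fuel with
  | zero =>
      intro done acc hf
      rw [pyRange_pos_nil _ _ _ hc (by omega)]
      simp [pvLoopA]
  | succ f ih =>
      intro done acc hf
      by_cases h : done + c < sh
      · have hrec := ih (done + c) (acc ++ [c]) (by omega)
        rw [pvLoopA, if_pos h, hrec, pyRange_pos_cons _ _ _ hc h]
        rw [pv_getLast_getD_cons]
        simp
      · rw [pyRange_pos_nil _ _ _ hc (by omega)]
        simp [pvLoopA, h]

theorem pvDiffs_cons_cons (a b : Int) (l : List Int) :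
    pvDiffs (a :: b :: l) = (b - a) :: pvDiffs (b :: l) := by
  simp [pvDiffs]

-- differences across a constant-step run of boundaries
theorem pvDiffs_range (sh c : Int) (hc : 0 < c) :
    ∀ (n : Nat) (b : Int) (tail : List Int), (sh - b).toNat ≤ n →
      pvDiffs (b :: (PySem.List.pyRange (b + c) sh c ++ tail))
        = (PySem.List.pyRange (b + c) sh c).map (fun _ => c)
            ++ pvDiffs ((PySem.List.pyRange (b + c) sh c).getLast?.getD b :: tail) := by
  intro n
  induction n with
  | zero =>
      intro b tail hn
      rw [pyRange_pos_nil _ _ _ hc (by omega)]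
      simp
  | succ m ih =>
      intro b tail hn
      by_cases h : b + c < sh
      · rw [pyRange_pos_cons _ _ _ hc h, List.cons_append, pvDiffs_cons_cons,
            ih (b + c) tail (by omega), pv_getLast_getD_cons]
        simp
      · rw [pyRange_pos_nil _ _ _ hc (by omega)]
        simp

theorem getLast!_cons_eq (l : List Int) : ∀ (a : Int),
    (a :: l).getLast! = l.getLast?.getD a := by
  induction l with
  | nil => intro a; rfl
  | cons x xs ih =>
      intro a
      rw [pv_getLast_getD_cons, ← ih x]
      rfl

-- the per-dimension equality
theorem pvChunkDim_eq (s sh str c : Int) (hc : 0 < c) :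
    pvChunkDimA s sh str c = pvChunkDimB s sh str c := by
  have hm : PySem.Int.mod s c = s % c := PySem.Int.mod_eq_emod_of_pos hc
  have h0 : 0 ≤ s % c := Int.emod_nonneg s (by omega)
  have h1 : s % c < c := Int.emod_lt_of_pos s hc
  unfold pvChunkDimA pvChunkDimB
  dsimp only
  rw [hm]
  have hfpos : 0 < c - s % c := by omega
  generalize hq : c - s % c = first at hfpos
  rw [if_pos (by omega : first ≠ 0)]
  rw [pvLoopA_char sh c hc _ first [first] (le_refl _)]
  rw [getLast!_cons_eq]
  rw [show (0 : Int) :: (first :: PySem.List.pyRange (first + c) sh c)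
        ++ (if (PySem.List.pyRange (first + c) sh c).getLast?.getD first ≠ sh then [sh] else [])
      = 0 :: first :: (PySem.List.pyRange (first + c) sh c
        ++ (if (PySem.List.pyRange (first + c) sh c).getLast?.getD first ≠ sh then [sh] else []))
      by simp]
  rw [pvDiffs_cons_cons, pvDiffs_range sh c hc (sh - first).toNat first _ (le_refl _)]
  generalize (PySem.List.pyRange (first + c) sh c).getLast?.getD first = L
  generalize (PySem.List.pyRange (first + c) sh c).map (fun _ => c) = M
  by_cases hLs : L ≠ sh
  · simp [hLs, pvDiffs]
  · simp [hLs, pvDiffs]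

-- membership of the chunk component of the 4-way zip in the take-prefix Pre_ quantifies over
theorem pvZip4_mem_chunk :
    ∀ (ws sh str tc : List Int) (t : Int × Int × Int × Int), t ∈ pvZip4 ws sh str tc →
      t.2.2.2 ∈ tc.take (min (min ws.length sh.length) str.length) := by
  intro ws
  induction ws with
  | nil => intro sh str tc t ht; simp [pvZip4] at ht
  | cons a as ih =>
      intro sh str tc t ht
      match sh, str, tc with
      | [], _, _ => simp [pvZip4] at ht
      | _ :: _, [], _ => simp [pvZip4] at ht
      | _ :: _, _ :: _, [] => simp [pvZip4] at ht
      | b :: bs, c :: cs, d :: ds =>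
          simp only [pvZip4, List.mem_cons] at ht
          have hmin : min (min (as.length + 1) (bs.length + 1)) (cs.length + 1)
              = min (min as.length bs.length) cs.length + 1 := by omega
          simp only [List.length_cons, hmin, List.take_succ_cons, List.mem_cons]
          rcases ht with h | h
          · left; rw [h]
          · right; exact ih bs cs ds t h

-- ===== VERDICT (by name: the statement is the Claim_ definition above) =====
theorem chunk_into_spec : Claim_equal_chunk_into := by
  intro ws sh tc stride _ hpre
  unfold Spec_chunk_into chunk_into chunk_into_alt
  apply List.map_congr_left
  intro t ht
  apply pvChunkDim_eq
  apply hpre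
  have := pvZip4_mem_chunk ws sh _ tc t ht
  cases stride <;> simpa using this
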